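-- pv_equiv track=rewrite | github.com/SamiaAitAyadGoncalves/codewars-1 | Python/5kyu/Mixbonacci.py | mixbonacci
-- ===== SOURCE A (Python) =====
-- def mixbonacci(pattern, length):
--     if pattern == [] or length == 0:
--         return []
--     else:
--         result = []
--         fib_a, fib_b = 0, 1
--         pad_a, pad_b, pad_c = 1, 0, 0
--         pel_a, pel_b = 0, 1
--         jac_a, jac_b = 0, 1
--         tri_a, tri_b, tri_c = 0, 0, 1
--         tet_a, tet_b, tet_c, tet_d = 0, 0, 0, 1
--         for i in range(length):
--             if pattern[i % len(pattern)] == 'fib':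
--                 result.append(fib_a)
--                 fib_a, fib_b = fib_b, fib_a + fib_b
--
--             elif pattern[i % len(pattern)] == 'pad':
--                     result.append(pad_a)
--                     pad_a, pad_b, pad_c = pad_b, pad_c, pad_b + pad_a
--
--             elif pattern[i % len(pattern)] == 'pel':
--                     result.append(pel_a)
--                     pel_a, pel_b = pel_b, 2*pel_b + pel_a
--
--             elif pattern[i % len(pattern)] == 'jac':
--                     result.append(jac_a)
--                     jac_a, jac_b = jac_b, jac_b + 2*jac_a
--
--             elif pattern[i % len(pattern)] == 'tri':
--                     result.append(tri_a)
--                     tri_a, tri_b, tri_c = tri_b, tri_c, tri_c + tri_b + tri_a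
--
--             elif pattern[i % len(pattern)] == 'tet':
--                     result.append(tet_a)
--                     tet_a, tet_b, tet_c, tet_d = tet_b, tet_c, tet_d, tet_d + tet_c + tet_b + tet_a
--
--         return result
-- ===== SOURCE B (Python) =====
-- def gen(seeds, coeffs, k):
--     # first k terms of the linear recurrence with the given seed window and coefficients
--     state, out = list(seeds), []
--     for _ in range(k):
--         out.append(state[0])
--         state = state[1:] + [sum(c * s for c, s in zip(coeffs, state))]
--     return out
--
--
-- def mixbonacci(pattern, length):
--     if pattern == [] or length == 0:
--         return []
--     table = {'fib': ([0, 1], [1, 1]), 'pad': ([1, 0, 0], [1, 1, 0]),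
--              'pel': ([0, 1], [1, 2]), 'jac': ([0, 1], [2, 1]),
--              'tri': ([0, 0, 1], [1, 1, 1]), 'tet': ([0, 0, 0, 1], [1, 1, 1, 1])}
--     # stage 1: expand the pattern into the full visited-name sequence
--     names = [pattern[i % len(pattern)] for i in range(length)]
--     # stage 2: generate each sequence's terms in one batch, exactly as many as needed
--     pending = {nm: gen(seeds, coeffs, names.count(nm)) for nm, (seeds, coeffs) in table.items()}
--     # stage 3: merge, consuming each sequence's pre-generated terms in order
--     result = []
--     for nm in names:
--         if nm in table:
--             result.append(pending[nm].pop(0))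
--     return result
-- ===== Notes on version B (the rewrite author's own statement) =====
-- stated objective: alternative
-- what changed: Instead of one interleaved loop mutating sixteen scalar state variables, B works in stages: it expands the pattern into the full visited-name list, batch-generates each sequence's terms independently with a generic linear-recurrence generator (seed window + coefficient vector), and then merges by consuming each sequence's pre-generated term list in order.
import Mathlib
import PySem

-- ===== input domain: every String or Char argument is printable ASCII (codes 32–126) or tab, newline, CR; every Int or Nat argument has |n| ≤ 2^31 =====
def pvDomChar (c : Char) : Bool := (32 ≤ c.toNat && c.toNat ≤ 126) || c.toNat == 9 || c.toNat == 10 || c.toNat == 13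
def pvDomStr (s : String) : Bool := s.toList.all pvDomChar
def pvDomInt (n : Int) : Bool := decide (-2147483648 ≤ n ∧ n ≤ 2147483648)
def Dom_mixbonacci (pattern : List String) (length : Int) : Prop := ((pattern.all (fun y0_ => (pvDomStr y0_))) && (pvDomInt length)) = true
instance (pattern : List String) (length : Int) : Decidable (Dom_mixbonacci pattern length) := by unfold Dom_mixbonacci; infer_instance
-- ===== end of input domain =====

-- B replaces A's single interleaved loop over sixteen scalar state variables by staged passes:
-- expand the pattern into the visited-name list, batch-generate each sequence's terms with one
-- generic linear-recurrence generator, then merge by consuming the pre-generated lists (alternative).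

-- ===== PORT A =====
-- A's sixteen scalar loop variables, as one record.
structure MixSt where
  fa : Int
  fb : Int
  pa : Int
  pb : Int
  pc : Int
  ea : Int
  eb : Int
  ja : Int
  jb : Int
  ta : Int
  tb : Int
  tc : Int
  qa : Int
  qb : Int
  qc : Int
  qd : Int
deriving Repr, DecidableEq

-- the if/elif chain of A's loop body, on the name pattern[i % len(pattern)]
def mixStepName (st : List Int × MixSt) (name : String) : List Int × MixSt :=
  let t := st.2
  if name = "fib" then (st.1 ++ [t.fa], { t with fa := t.fb, fb := t.fa + t.fb })
  else if name = "pad" then (st.1 ++ [t.pa], { t with pa := t.pb, pb := t.pc, pc := t.pb + t.pa })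
  else if name = "pel" then (st.1 ++ [t.ea], { t with ea := t.eb, eb := 2 * t.eb + t.ea })
  else if name = "jac" then (st.1 ++ [t.ja], { t with ja := t.jb, jb := t.jb + 2 * t.ja })
  else if name = "tri" then (st.1 ++ [t.ta], { t with ta := t.tb, tb := t.tc, tc := t.tc + t.tb + t.ta })
  else if name = "tet" then (st.1 ++ [t.qa], { t with qa := t.qb, qb := t.qc, qc := t.qd, qd := t.qd + t.qc + t.qb + t.qa })
  else st

-- one iteration of A's for-loop; pattern[i % len(pattern)] is always in range since
-- pattern ≠ [] there, so the .getD "" default of pyGet? is unreachable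
def mixStepA (pattern : List String) (st : List Int × MixSt) (i : Int) : List Int × MixSt :=
  mixStepName st ((PySem.List.pyGet? pattern (PySem.Int.mod i pattern.length)).getD "")

def mixbonacci (pattern : List String) (length : Int) : List Int :=
  if pattern = [] ∨ length = 0 then []
  else
    ((PySem.List.pyRange 0 length 1).foldl (mixStepA pattern)
      ([], ⟨0, 1, 1, 0, 0, 0, 1, 0, 1, 0, 0, 1, 0, 0, 0, 1⟩)).1

-- ===== PORT B =====
-- Source B's gen, loop body pieces: the appended value state[0] (state is never empty: the seed
-- lists are non-empty and the update preserves length, so .getD 0 is unreachable) …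
def mixVal (st : List Int) : Int := (PySem.List.pyGet? st 0).getD 0

-- … and the state update state[1:] + [sum(c * s for c, s in zip(coeffs, state))]
def mixNext (coeffs st : List Int) : List Int :=
  PySem.List.slice st (some 1) none ++
    [(coeffs.zip st).foldl (fun a p => a + p.1 * p.2) 0]

-- Source B's gen(seeds, coeffs, k): first k terms of the linear recurrence
def mixGen (seeds coeffs : List Int) (k : Int) : List Int :=
  ((PySem.List.pyRange 0 k 1).foldl
    (fun (p : List Int × List Int) _ => (mixNext coeffs p.1, p.2 ++ [mixVal p.1]))
    (seeds, [])).2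

-- Source B's table: seed window and coefficient vector per name (none = 'nm not in table')
def mixTable (nm : String) : Option (List Int × List Int) :=
  if nm = "fib" then some ([0, 1], [1, 1])
  else if nm = "pad" then some ([1, 0, 0], [1, 1, 0])
  else if nm = "pel" then some ([0, 1], [1, 2])
  else if nm = "jac" then some ([0, 1], [2, 1])
  else if nm = "tri" then some ([0, 0, 1], [1, 1, 1])
  else if nm = "tet" then some ([0, 0, 0, 1], [1, 1, 1, 1])
  else none

-- one iteration of Source B's merge loop; pending[nm] is non-empty whenever nm occurs in names
-- (gen produced exactly names.count(nm) terms), so pop(0)'s .getD default is unreachable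
def mixStepB (st : List Int × PySem.Dict String (List Int)) (nm : String) :
    List Int × PySem.Dict String (List Int) :=
  if (mixTable nm).isSome then
    let pr := (PySem.List.pop? ((st.2.get? nm).getD []) 0).getD (0, [])
    (st.1 ++ [pr.1], st.2.insert nm pr.2)
  else st

def mixbonacci_alt (pattern : List String) (length : Int) : List Int :=
  if pattern = [] ∨ length = 0 then []
  else
    let names := (PySem.List.pyRange 0 length 1).map
      (fun i => (PySem.List.pyGet? pattern (PySem.Int.mod i pattern.length)).getD "")
    let pending : PySem.Dict String (List Int) := PySem.Dict.ofList
      [("fib", mixGen [0, 1] [1, 1] ((names.count "fib" : Nat) : Int)),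
       ("pad", mixGen [1, 0, 0] [1, 1, 0] ((names.count "pad" : Nat) : Int)),
       ("pel", mixGen [0, 1] [1, 2] ((names.count "pel" : Nat) : Int)),
       ("jac", mixGen [0, 1] [2, 1] ((names.count "jac" : Nat) : Int)),
       ("tri", mixGen [0, 0, 1] [1, 1, 1] ((names.count "tri" : Nat) : Int)),
       ("tet", mixGen [0, 0, 0, 1] [1, 1, 1, 1] ((names.count "tet" : Nat) : Int))]
    (names.foldl mixStepB ([], pending)).1

-- ===== PRECONDITION & SPEC =====
def Spec_mixbonacci (pattern : List String) (length : Int) (out : List Int) : Prop := out = mixbonacci_alt pattern length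
instance (pattern : List String) (length : Int) (out : List Int) : Decidable (Spec_mixbonacci pattern length out) := by unfold Spec_mixbonacci; infer_instance

-- ===== CLAIM (what is proved, stated in full; the proofs are below) =====
def Claim_equal_mixbonacci : Prop := ∀ (pattern : List String) (length : Int), Dom_mixbonacci pattern length → Spec_mixbonacci pattern length (mixbonacci pattern length)

-- ===== LEMMAS AND PROOFS =====

-- abstraction of gen: the first k terms produced from state st (structural recursion)
def genFrom (coeffs st : List Int) : Nat → List Int
  | 0 => []
  | m + 1 => mixVal st :: genFrom coeffs (mixNext coeffs st) m

lemma foldGen (coeffs : List Int) : ∀ (l : List Int) (st out : List Int),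
    (l.foldl (fun (p : List Int × List Int) _ => (mixNext coeffs p.1, p.2 ++ [mixVal p.1]))
      (st, out)).2 = out ++ genFrom coeffs st l.length := by
  intro l
  induction l with
  | nil => intro st out; simp [genFrom]
  | cons _ rest ih =>
      intro st out
      simp only [List.foldl_cons, List.length_cons, genFrom, ih]
      simp

lemma mixGen_eq (seeds coeffs : List Int) (k : Nat) :
    mixGen seeds coeffs (k : Int) = genFrom coeffs seeds k := by
  unfold mixGen
  rw [foldGen]
  simp [PySem.List.length_pyRange_one]

-- B's pending dict corresponding to A's state record t, with each sequence holding exactly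
-- as many terms as it still has occurrences in the remaining names list
def pendingOf (t : MixSt) (names : List String) : PySem.Dict String (List Int) :=
  PySem.Dict.ofList
    [("fib", genFrom [1, 1] [t.fa, t.fb] (names.count "fib")),
     ("pad", genFrom [1, 1, 0] [t.pa, t.pb, t.pc] (names.count "pad")),
     ("pel", genFrom [1, 2] [t.ea, t.eb] (names.count "pel")),
     ("jac", genFrom [2, 1] [t.ja, t.jb] (names.count "jac")),
     ("tri", genFrom [1, 1, 1] [t.ta, t.tb, t.tc] (names.count "tri")),
     ("tet", genFrom [1, 1, 1, 1] [t.qa, t.qb, t.qc, t.qd] (names.count "tet"))]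

set_option maxHeartbeats 1000000 in
lemma mixStep_eq (nm : String) (rest : List String) (res : List Int) (t : MixSt) :
    mixStepB (res, pendingOf t (nm :: rest)) nm
      = ((mixStepName (res, t) nm).1, pendingOf (mixStepName (res, t) nm).2 rest) := by
  by_cases h1 : nm = "fib" <;> by_cases h2 : nm = "pad" <;> by_cases h3 : nm = "pel" <;>
    by_cases h4 : nm = "jac" <;> by_cases h5 : nm = "tri" <;> by_cases h6 : nm = "tet" <;>
    simp_all [mixStepB, mixStepName, mixTable, pendingOf, genFrom, mixVal, mixNext,
      PySem.Dict.ofList, PySem.Dict.insert, PySem.Dict.update, PySem.Dict.empty,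
      PySem.Dict.contains, PySem.Dict.get?, PySem.List.pop?, PySem.List.pyGet?,
      PySem.List.pyIdx?, PySem.List.slice_from_one] <;> ring_nf

lemma mixMain : ∀ (names : List String) (res : List Int) (t : MixSt),
    (names.foldl mixStepB (res, pendingOf t names)).1
      = (names.foldl mixStepName (res, t)).1 := by
  intro names
  induction names with
  | nil => intro res t; rfl
  | cons nm rest ih =>
      intro res t
      simp only [List.foldl_cons, mixStep_eq]
      exact ih _ _

-- ===== VERDICT (by name: the statement is the Claim_ definition above) =====
theorem mixbonacci_spec : Claim_equal_mixbonacci := by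
  intro pattern length _
  unfold Spec_mixbonacci mixbonacci mixbonacci_alt
  by_cases h : pattern = [] ∨ length = 0
  · simp [h]
  · simp only [h, if_false]
    rw [show mixStepA pattern = fun st i =>
          mixStepName st ((PySem.List.pyGet? pattern (PySem.Int.mod i pattern.length)).getD "")
        from rfl, ← List.foldl_map]
    rw [mixGen_eq, mixGen_eq, mixGen_eq, mixGen_eq, mixGen_eq, mixGen_eq]
    exact (mixMain _ [] ⟨0, 1, 1, 0, 0, 0, 1, 0, 1, 0, 0, 1, 0, 0, 0, 1⟩).symm
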